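-- pv_equiv track=rewrite | github.com/vlifanoff/CodewarsKata | 7_kyu/simple_fun_30__strings_construction.py | strings_construction
-- ===== SOURCE A (Python) =====
-- from itertools import cycle
--
-- def strings_construction(strng, letters):
--     tmp_b = [x for x in letters]
--
--     counter = 0
--     for i, x in enumerate(cycle(strng), 1):
--         if x in tmp_b:
--             tmp_b.remove(x)
--             if i % len(strng) == 0:
--                 counter += 1
--         else:
--             return counter
--
--     return 0
-- ===== SOURCE B (Python) =====
-- def strings_construction(strng, letters):
--     if not strng:
--         return 0
--     need = {}
--     for c in strng:
--         need[c] = need.get(c, 0) + 1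
--     have = {}
--     for c in letters:
--         have[c] = have.get(c, 0) + 1
--     return min(have.get(c, 0) // n for c, n in need.items())
-- ===== Notes on version B (the rewrite author's own statement) =====
-- stated objective: faster
-- what changed: Replaces A's letter-by-letter cycle-and-remove simulation with frequency counting of both strings and a single min over distinct characters of letters_count[c] // strng_count[c].
import Mathlib
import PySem

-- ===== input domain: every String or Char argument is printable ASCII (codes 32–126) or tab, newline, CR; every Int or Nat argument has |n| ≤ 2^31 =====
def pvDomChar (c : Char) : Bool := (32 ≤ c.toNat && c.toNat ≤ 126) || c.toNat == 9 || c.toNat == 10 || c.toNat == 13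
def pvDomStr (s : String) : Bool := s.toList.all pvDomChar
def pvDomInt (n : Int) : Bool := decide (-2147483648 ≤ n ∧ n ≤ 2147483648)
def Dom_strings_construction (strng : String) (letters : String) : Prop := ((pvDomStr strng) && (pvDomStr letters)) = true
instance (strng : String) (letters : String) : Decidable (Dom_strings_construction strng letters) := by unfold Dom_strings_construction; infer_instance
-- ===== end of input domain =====

-- B replaces A's cycle-through-strng-and-remove simulation by frequency counts of both
-- strings and one min over distinct characters of letters_count[c] // strng_count[c] (faster).

-- ===== PORT A =====
-- the for-loop over cycle(strng): at step i (1-based) the character is strng[(i-1) % len];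
-- each iteration either removes a letter from tmp_b (so tmp_b.length decreases) or returns.
-- The getD default ' ' is never read: the caller only passes a non-empty s, and (i-1) % s.length < s.length.
def pyLoopA (s : List Char) (tmp : List Char) (i : Nat) (counter : Int) : Int :=
  if h : s.getD ((i - 1) % s.length) ' ' ∈ tmp then
    pyLoopA s (tmp.erase (s.getD ((i - 1) % s.length) ' ')) (i + 1)
      (if i % s.length = 0 then counter + 1 else counter)
  else counter
termination_by tmp.length
decreasing_by
  rw [List.length_erase_of_mem h]
  exact Nat.sub_lt (List.length_pos_of_mem h) one_pos

def strings_construction (strng : String) (letters : String) : Int :=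
  -- cycle('') is empty, so for empty strng the for-loop body never runs and A falls
  -- through to its final `return 0`; otherwise that final return is unreachable.
  if strng.toList.isEmpty then 0
  else pyLoopA strng.toList letters.toList 1 0

-- ===== PORT B =====
def strings_construction_alt (strng : String) (letters : String) : Int :=
  if strng.toList.isEmpty then 0
  else
    let need := strng.toList.foldl (fun d x => d.insert x (d.getD x 0 + 1))
      (PySem.Dict.empty (κ := Char) (ν := Int))
    let haveC := letters.toList.foldl (fun d x => d.insert x (d.getD x 0 + 1))
      (PySem.Dict.empty (κ := Char) (ν := Int))
    match PySem.List.min?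
        (need.items.map (fun p => PySem.Int.floordiv (haveC.getD p.1 0) p.2))
        (fun x => x) with
    | some v => v
    | none => 0    -- unreachable: strng is non-empty, so need.items is non-empty

-- ===== PRECONDITION & SPEC =====
def Spec_strings_construction (strng : String) (letters : String) (out : Int) : Prop := out = strings_construction_alt strng letters
instance (strng : String) (letters : String) (out : Int) : Decidable (Spec_strings_construction strng letters out) := by unfold Spec_strings_construction; infer_instance

-- ===== CLAIM (what is proved, stated in full; the proofs are below) =====
def Claim_equal_strings_construction : Prop := ∀ (strng : String) (letters : String), Dom_strings_construction strng letters → Spec_strings_construction strng letters (strings_construction strng letters)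

-- ===== LEMMAS AND PROOFS =====

-- the common value: min over the distinct characters of s of count(tmp,c) / count(s,c)
def mval (s tmp : List Char) : Nat :=
  (((PySem.List.dedup s).map (fun c => List.count c tmp / List.count c s)).min?).getD 0

lemma mval_spec (s tmp : List Char) (hs : s ≠ []) :
    (∃ c ∈ s, mval s tmp = List.count c tmp / List.count c s) ∧
      (∀ c ∈ s, mval s tmp ≤ List.count c tmp / List.count c s) := by
  unfold mval
  set L := (PySem.List.dedup s).map (fun c => List.count c tmp / List.count c s) with hL
  have hLne : L ≠ [] := by
    obtain ⟨x, t, rfl⟩ := List.exists_cons_of_ne_nil hs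
    have hx : x ∈ PySem.List.dedup (x :: t) := (PySem.List.mem_dedup _ _).mpr (by simp)
    exact List.ne_nil_of_mem (List.mem_map.mpr ⟨x, hx, rfl⟩)
  obtain ⟨m, hm⟩ : ∃ m, L.min? = some m := by
    cases h : L.min? with
    | none => exact absurd (List.min?_eq_none_iff.mp h) hLne
    | some m => exact ⟨m, rfl⟩
  rw [hm]
  have hmem := (List.min?_eq_some_iff.mp hm).1
  have hle := (List.min?_eq_some_iff.mp hm).2
  constructor
  · obtain ⟨c, hc, hcm⟩ := List.mem_map.mp hmem
    exact ⟨c, (PySem.List.mem_dedup _ _).mp hc, hcm.symm⟩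
  · intro c hc
    exact hle _ (List.mem_map.mpr ⟨c, (PySem.List.mem_dedup _ _).mpr hc, rfl⟩)

lemma mval_zero (s tmp : List Char) (hs : s ≠ [])
    (h : ∃ c ∈ s, List.count c tmp < List.count c s) : mval s tmp = 0 := by
  obtain ⟨c, hc, hlt⟩ := h
  have := (mval_spec s tmp hs).2 c hc
  rw [Nat.div_eq_of_lt hlt] at this
  omega

lemma count_foldl_erase (d : List Char) :
    ∀ tmp : List Char, (∀ c, List.count c d ≤ List.count c tmp) →
      ∀ c, List.count c (d.foldl (fun t y => t.erase y) tmp) = List.count c tmp - List.count c d := by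
  induction d with
  | nil => simp
  | cons x d ih =>
    intro tmp h c
    have hx1 : List.count x d + 1 ≤ List.count x tmp := by
      have := h x; rwa [List.count_cons_self] at this
    have hsub : ∀ c, List.count c d ≤ List.count c (tmp.erase x) := by
      intro c
      rw [List.count_erase]
      by_cases e : c = x
      · subst e
        simp only [BEq.rfl, if_true]
        omega
      · have hc := h c
        rw [List.count_cons_of_ne (Ne.symm e)] at hc
        simp only [beq_false_of_ne (Ne.symm e), Bool.false_eq_true, if_false]
        omega
    rw [List.foldl_cons, ih (tmp.erase x) hsub c, List.count_erase]
    by_cases e : c = x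
    · subst e
      rw [List.count_cons_self]
      simp only [BEq.rfl, if_true]
      omega
    · have hc := h c
      rw [List.count_cons_of_ne (Ne.symm e)]
      simp only [beq_false_of_ne (Ne.symm e), Bool.false_eq_true, if_false]
      omega

lemma length_foldl_erase_le (d : List Char) :
    ∀ tmp : List Char, (d.foldl (fun t y => t.erase y) tmp).length ≤ tmp.length := by
  induction d with
  | nil => simp
  | cons x d ih =>
    intro tmp
    rw [List.foldl_cons]
    exact le_trans (ih (tmp.erase x)) List.length_erase_le

lemma mval_succ (s tmp : List Char) (hs : s ≠ [])
    (hfit : ∀ c, List.count c s ≤ List.count c tmp) :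
    mval s tmp = mval s (s.foldl (fun t y => t.erase y) tmp) + 1 := by
  set tmp' := s.foldl (fun t y => t.erase y) tmp with htmp'
  have hcnt : ∀ c, List.count c tmp' = List.count c tmp - List.count c s :=
    count_foldl_erase s tmp hfit
  obtain ⟨⟨c1, hc1, he1⟩, hmin1⟩ := mval_spec s tmp hs
  obtain ⟨⟨c0, hc0, he0⟩, hmin0⟩ := mval_spec s tmp' hs
  have key : ∀ c ∈ s, List.count c tmp' / List.count c s = List.count c tmp / List.count c s - 1 ∧
      1 ≤ List.count c tmp / List.count c s := by
    intro c hc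
    have hpos : 0 < List.count c s := List.count_pos_iff.mpr hc
    have hle : List.count c s ≤ List.count c tmp := hfit c
    have h1 : 1 ≤ List.count c tmp / List.count c s := (Nat.one_le_div_iff hpos).mpr hle
    have h2 : List.count c tmp' / List.count c s = List.count c tmp / List.count c s - 1 := by
      rw [hcnt c]
      have hcancel : List.count c tmp - List.count c s + List.count c s = List.count c tmp :=
        Nat.sub_add_cancel hle
      have h3 := Nat.add_div_right (List.count c tmp - List.count c s) hpos
      rw [hcancel] at h3
      omega
    exact ⟨h2, h1⟩
  have k0 := key c0 hc0
  have k1 := key c1 hc1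
  have hA := hmin1 c0 hc0
  have hB := hmin0 c1 hc1
  omega

lemma cond_cons (x : Char) (d tmp : List Char) (hx : x ∈ tmp) :
    (∀ c ∈ x :: d, List.count c (x :: d) ≤ List.count c tmp) ↔
      (∀ c ∈ d, List.count c d ≤ List.count c (tmp.erase x)) := by
  have hxpos : 0 < List.count x tmp := List.count_pos_iff.mpr hx
  constructor
  · intro h c hc
    have hcc := h c (by simp [hc])
    rw [List.count_erase]
    by_cases e : c = x
    · subst e
      rw [List.count_cons_self] at hcc
      simp only [BEq.rfl, if_true]
      omega
    · rw [List.count_cons_of_ne (Ne.symm e)] at hcc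
      simp only [beq_false_of_ne (Ne.symm e), Bool.false_eq_true, if_false]
      omega
  · intro h c hc
    by_cases e : c = x
    · subst e
      by_cases hxd : c ∈ d
      · have hd := h c hxd
        rw [List.count_erase] at hd
        simp only [BEq.rfl, if_true] at hd
        rw [List.count_cons_self]
        omega
      · rw [List.count_cons_self, List.count_eq_zero_of_not_mem hxd]
        omega
    · rcases List.mem_cons.mp hc with e' | hcd
      · exact absurd e' e
      · have hd := h c hcd
        rw [List.count_erase] at hd
        simp only [beq_false_of_ne (Ne.symm e), Bool.false_eq_true, if_false] at hd
        rw [List.count_cons_of_ne (Ne.symm e)]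
        omega

-- one full pass over the suffix d of s (d = s.drop (s.length - d.length)):
-- if tmp covers d, the whole suffix is removed and the loop continues at the next cycle
-- with counter+1; otherwise the loop returns counter at the first missing character.
lemma cycle_lemma (s : List Char) (hs : s ≠ []) :
    ∀ (d : List Char), d ≠ [] → ∀ (tmp : List Char) (q : Nat) (counter : Int),
      s.drop (s.length - d.length) = d →
      pyLoopA s tmp (q * s.length + (s.length - d.length) + 1) counter =
        if ∀ c ∈ d, List.count c d ≤ List.count c tmp
        then pyLoopA s (d.foldl (fun t y => t.erase y) tmp) ((q + 1) * s.length + 1) (counter + 1)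
        else counter := by
  intro d
  induction d with
  | nil => intro h; exact absurd rfl h
  | cons x d' ih =>
    intro _ tmp q counter hdrop
    have hn : 0 < s.length := List.length_pos_of_ne_nil hs
    have hlen : d'.length + 1 ≤ s.length := by
      have := congrArg List.length hdrop
      simp [List.length_drop] at this
      omega
    set n := s.length with hndef
    set p := n - (x :: d').length with hp
    have hpn : p < n := by simp only [hp, List.length_cons]; omega
    have hplen : p + (d'.length + 1) = n := by
      simp only [hp, List.length_cons]
      omega
    have hget : s.getD p ' ' = x := by
      have h0 : (s.drop p)[0]? = some x := by rw [hdrop]; rfl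
      rw [List.getElem?_drop, Nat.add_zero] at h0
      simp [List.getD_eq_getElem?_getD, h0]
    have hidx : s.getD ((q * n + p + 1 - 1) % n) ' ' = x := by
      have h1 : q * n + p + 1 - 1 = q * n + p := rfl
      rw [h1, Nat.mul_add_mod_self_right, Nat.mod_eq_of_lt hpn, hget]
    rw [pyLoopA]
    rw [show ((q * n + p + 1 - 1) % n) = (q * n + p + 1 - 1) % s.length from rfl] at hidx
    by_cases hx : x ∈ tmp
    · rw [dif_pos (hidx ▸ hx)]
      rw [hidx]
      have himod : (q * n + p + 1) % n = (p + 1) % n := by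
        have h1 : q * n + p + 1 = q * n + (p + 1) := by omega
        rw [h1, Nat.mul_add_mod_self_right]
      by_cases hd' : d' = []
      · subst hd'
        have hp1 : p + 1 = n := by simp at hplen; omega
        have hz : (q * n + p + 1) % s.length = 0 := by
          rw [himod, hp1, Nat.mod_self]
        rw [if_pos hz]
        have hi : q * n + p + 1 + 1 = (q + 1) * n + 1 := by
          have : (q + 1) * n = q * n + n := by ring
          omega
        rw [hi]
        rw [if_pos ?side]
        case side =>
          intro c hc
          simp only [List.mem_singleton] at hc
          subst hc
          have := List.count_pos_iff.mpr hx
          simp only [List.count_cons_self, List.count_nil]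
          omega
        simp [List.foldl_cons]
      · have hd'len : 0 < d'.length := List.length_pos_of_ne_nil hd'
        have hp1 : p + 1 < n := by omega
        have hnz : ¬ (q * n + p + 1) % s.length = 0 := by
          rw [himod, Nat.mod_eq_of_lt hp1]
          omega
        rw [if_neg hnz]
        have hdrop' : s.drop (n - d'.length) = d' := by
          have h1 : n - d'.length = p + 1 := by omega
          rw [h1]
          have h2 : (s.drop p).drop 1 = s.drop (p + 1) := by rw [List.drop_drop]
          rw [← h2, hdrop]
          rfl
        have hi : q * n + p + 1 + 1 = q * n + (n - d'.length) + 1 := by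
          omega
        rw [hi, ih hd' (tmp.erase x) q counter hdrop']
        rw [show ((x :: d').foldl (fun t y => t.erase y) tmp) = d'.foldl (fun t y => t.erase y) (tmp.erase x) from rfl]
        simp only [cond_cons x d' tmp hx]
    · rw [dif_neg (by rw [hidx]; exact hx)]
      rw [if_neg ?nofit]
      case nofit =>
        intro hall
        have := hall x (by simp)
        rw [List.count_eq_zero_of_not_mem hx] at this
        simp at this

lemma loopA_eq_mval (s : List Char) (hs : s ≠ []) :
    ∀ (k : Nat) (tmp : List Char) (q : Nat) (counter : Int), tmp.length ≤ k →
      pyLoopA s tmp (q * s.length + 1) counter = counter + (mval s tmp : Int) := by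
  intro k
  induction k with
  | zero =>
    intro tmp q counter hlen
    have htmp : tmp = [] := List.eq_nil_of_length_eq_zero (by omega)
    subst htmp
    obtain ⟨x, t, hst⟩ := List.exists_cons_of_ne_nil hs
    have hc := cycle_lemma s hs s hs [] q counter (by simp)
    rw [show s.length - s.length = 0 by omega] at hc
    rw [show q * s.length + 0 + 1 = q * s.length + 1 by omega] at hc
    rw [if_neg ?nofit] at hc
    case nofit =>
      intro hall
      have := hall x (by rw [hst]; simp)
      have hxp : 0 < List.count x s := List.count_pos_iff.mpr (by rw [hst]; simp)
      simp at this
      omega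
    rw [hc, mval_zero s [] hs ⟨x, by rw [hst]; simp,
      by have := List.count_pos_iff.mpr (show x ∈ s by rw [hst]; simp); simpa using this⟩]
    simp
  | succ k ih =>
    intro tmp q counter hlen
    have hc := cycle_lemma s hs s hs tmp q counter (by simp)
    rw [show s.length - s.length = 0 by omega] at hc
    rw [show q * s.length + 0 + 1 = q * s.length + 1 by omega] at hc
    by_cases hfit : ∀ c ∈ s, List.count c s ≤ List.count c tmp
    · rw [if_pos hfit] at hc
      have hfit' : ∀ c, List.count c s ≤ List.count c tmp := by
        intro c
        by_cases hcs : c ∈ s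
        · exact hfit c hcs
        · simp [List.count_eq_zero_of_not_mem hcs]
      obtain ⟨x, t, hst⟩ := List.exists_cons_of_ne_nil hs
      have hxs : x ∈ s := by rw [hst]; simp
      have hxtmp : x ∈ tmp := by
        have h1 : 0 < List.count x s := List.count_pos_iff.mpr hxs
        have h2 := hfit' x
        exact List.count_pos_iff.mp (by omega)
      have hlt : (s.foldl (fun t y => t.erase y) tmp).length ≤ k := by
        have h1 : (s.foldl (fun t y => t.erase y) tmp).length ≤ (tmp.erase x).length := by
          conv_lhs => rw [hst]
          rw [List.foldl_cons]
          exact length_foldl_erase_le t (tmp.erase x)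
        rw [List.length_erase_of_mem hxtmp] at h1
        have h2 : 0 < tmp.length := List.length_pos_of_mem hxtmp
        omega
      rw [hc, ih _ (q + 1) _ hlt, mval_succ s tmp hs hfit']
      push_cast
      ring
    · rw [if_neg hfit] at hc
      rw [Classical.not_forall] at hfit
      simp only [not_forall, not_le] at hfit
      obtain ⟨c, hcs, hlt⟩ := hfit
      rw [hc, mval_zero s tmp hs ⟨c, hcs, by omega⟩]
      simp

lemma foldl_min_map_cast (f : Char → Nat) (r : List Char) :
    ∀ c : Nat, ((r.map (fun k => ((f k : Nat) : Int))).foldl min (c : Int)) =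
      (((r.map f).foldl min c : Nat) : Int) := by
  induction r with
  | nil => intro c; simp
  | cons a r ih =>
    intro c
    rw [List.map_cons, List.foldl_cons, List.map_cons, List.foldl_cons, ← Nat.cast_min]
    exact ih (min c (f a))

lemma alt_eq_mval (strng letters : String) (hs : strng.toList ≠ []) :
    strings_construction_alt strng letters = (mval strng.toList letters.toList : Int) := by
  unfold strings_construction_alt
  rw [if_neg (by simpa [List.isEmpty_iff] using hs)]
  simp only [PySem.Dict.foldl_insert_getD_add_one_eq_counter, PySem.Dict.items_counter,
    List.map_map]
  have hmapeq : ((PySem.Set.ofList strng.toList).map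
      ((fun p => PySem.Int.floordiv ((PySem.Dict.counter letters.toList).getD p.1 0) p.2) ∘
        fun k => (k, (List.count k strng.toList : Int)))) =
      (PySem.List.dedup strng.toList).map
        (fun k => ((List.count k letters.toList / List.count k strng.toList : Nat) : Int)) := by
    rw [PySem.List.dedup_eq_ofList]
    refine List.map_congr_left ?_
    intro k _
    simp [PySem.Dict.getD_counter, PySem.Int.floordiv_natCast]
  rw [hmapeq]
  obtain ⟨x, t, hst⟩ := List.exists_cons_of_ne_nil hs
  have hx : x ∈ PySem.List.dedup strng.toList := (PySem.List.mem_dedup _ _).mpr (by rw [hst]; simp)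
  obtain ⟨c, r, hcr⟩ := List.exists_cons_of_ne_nil (List.ne_nil_of_mem hx)
  unfold mval
  rw [hcr]
  simp only [List.map_cons, List.min?_cons']
  rw [PySem.List.min?_id_cons]
  simp only [Option.getD_some]
  exact foldl_min_map_cast (fun k => List.count k letters.toList / List.count k strng.toList) r
    (List.count c letters.toList / List.count c strng.toList)

-- ===== VERDICT (by name: the statement is the Claim_ definition above) =====
theorem strings_construction_spec : Claim_equal_strings_construction := by
  intro strng letters _
  unfold Spec_strings_construction strings_construction
  by_cases hs : strng.toList.isEmpty
  · rw [if_pos hs]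
    unfold strings_construction_alt
    rw [if_pos hs]
  · rw [if_neg hs]
    have hs' : strng.toList ≠ [] := by simpa [List.isEmpty_iff] using hs
    rw [alt_eq_mval _ _ hs']
    have := loopA_eq_mval strng.toList hs' letters.toList.length letters.toList 0 0 le_rfl
    simpa using this
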